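-- pv_equiv track=rewrite | github.com/PyFilesystem/pyfilesystem2 | fs/glob.py | _split_pattern_by_sep
-- ===== SOURCE A (Python) =====
-- def _split_pattern_by_sep(pattern):
--     # type: (Text) -> List[Text]
--     """Split a glob pattern at its directory seperators (/).
--
--     Takes into account escaped cases like [/].
--     """
--     indices = [-1]
--     bracket_open = False
--     for i, c in enumerate(pattern):
--         if c == "/" and not bracket_open:
--             indices.append(i)
--         elif c == "[":
--             bracket_open = True
--         elif c == "]":
--             bracket_open = False
--
--     indices.append(len(pattern))
--     return [pattern[i + 1 : j] for i, j in zip(indices[:-1], indices[1:])]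
-- ===== SOURCE B (Python) =====
-- def _split_pattern_by_sep(pattern):
--     # type: (Text) -> List[Text]
--     """Split a glob pattern at its directory separators (/),
--     treating a '/' inside brackets (like [/]) as escaped.
--
--     One pass: emit segments directly with a running buffer.
--     """
--     parts = []
--     current = ""
--     bracket_open = False
--     for c in pattern:
--         if c == "/" and not bracket_open:
--             parts.append(current)
--             current = ""
--         else:
--             if c == "[":
--                 bracket_open = True
--             elif c == "]":
--                 bracket_open = False
--             current += c
--     parts.append(current)
--     return parts
-- ===== Notes on version B (the rewrite author's own statement) =====
-- stated objective: simpler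
-- what changed: B emits segments directly in a single pass with a running buffer, instead of A's two-pass scheme of collecting separator indices and then slicing the pattern between consecutive index pairs.
import Mathlib
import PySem

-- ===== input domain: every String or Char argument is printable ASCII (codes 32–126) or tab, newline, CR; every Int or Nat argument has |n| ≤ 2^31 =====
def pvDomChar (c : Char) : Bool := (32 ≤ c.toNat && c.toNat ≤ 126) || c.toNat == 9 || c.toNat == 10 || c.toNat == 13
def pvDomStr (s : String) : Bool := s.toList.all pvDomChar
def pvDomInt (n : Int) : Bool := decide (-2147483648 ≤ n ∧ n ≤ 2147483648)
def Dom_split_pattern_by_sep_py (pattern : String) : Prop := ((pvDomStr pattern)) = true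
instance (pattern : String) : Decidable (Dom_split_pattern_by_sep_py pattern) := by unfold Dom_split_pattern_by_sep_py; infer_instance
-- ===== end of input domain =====

-- B replaces A's two-pass scheme (collect separator indices, then slice the pattern
-- between consecutive index pairs) by a single pass that emits segments directly from
-- a running buffer; same values, objective: simpler.

-- ===== PORT A =====
-- A's loop body: on an unescaped '/' record the index, on '[' / ']' toggle the flag.
def aStep (st : List Int × Bool) (ic : Int × Char) : List Int × Bool :=
  if ic.2 = '/' ∧ st.2 = false then (st.1 ++ [ic.1], st.2)
  else if ic.2 = '[' then (st.1, true)
  else if ic.2 = ']' then (st.1, false)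
  else st

-- pattern[i+1:j] is ported on the char list (both bounds here are ≥ 0, where Python
-- string slicing is exactly PySem.List.slice on the characters).
def split_pattern_by_sep_py (pattern : String) : List String :=
  let cs := pattern.toList
  let st := (PySem.List.enumerate cs 0).foldl aStep ([-1], false)
  let indices := st.1 ++ [(cs.length : Int)]
  (List.zip (PySem.List.slice indices none (some (-1)))
            (PySem.List.slice indices (some 1) none)).map
    (fun ij => String.ofList (PySem.List.slice cs (some (ij.1 + 1)) (some ij.2)))

-- ===== PORT B =====
-- B's loop body: on an unescaped '/' flush the buffer as a segment, otherwise append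
-- the char to the buffer (toggling the bracket flag on '[' / ']').
def bStep (st : List (List Char) × List Char × Bool) (c : Char) :
    List (List Char) × List Char × Bool :=
  if c = '/' ∧ st.2.2 = false then (st.1 ++ [st.2.1], [], st.2.2)
  else
    let bo := if c = '[' then true else if c = ']' then false else st.2.2
    (st.1, st.2.1 ++ [c], bo)

def split_pattern_by_sep_py_alt (pattern : String) : List String :=
  let st := pattern.toList.foldl bStep ([], [], false)
  (st.1 ++ [st.2.1]).map String.ofList

-- ===== PRECONDITION & SPEC =====
def Spec_split_pattern_by_sep_py (pattern : String) (out : List String) : Prop := out = split_pattern_by_sep_py_alt pattern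
instance (pattern : String) (out : List String) : Decidable (Spec_split_pattern_by_sep_py pattern out) := by unfold Spec_split_pattern_by_sep_py; infer_instance

-- ===== CLAIM (what is proved, stated in full; the proofs are below) =====
def Claim_equal_split_pattern_by_sep_py : Prop := ∀ (pattern : String), Dom_split_pattern_by_sep_py pattern → Spec_split_pattern_by_sep_py pattern (split_pattern_by_sep_py pattern)

-- ===== LEMMAS AND PROOFS =====

-- The bracket flag after one character, common to both loops.
def nextBo (c : Char) (bo : Bool) : Bool :=
  if c = '[' then true else if c = ']' then false else bo

-- Reference splitter: the intended segments, by structural recursion.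
def sp : List Char → Bool → List (List Char)
  | [], _ => [[]]
  | c :: cs, bo =>
    if c = '/' ∧ bo = false then [] :: sp cs false
    else
      match sp cs (nextBo c bo) with
      | [] => [[c]]
      | s :: r => (c :: s) :: r

lemma sp_ne_nil : ∀ (cs : List Char) (bo : Bool), sp cs bo ≠ []
  | [], _ => by simp [sp]
  | c :: cs, bo => by
    simp only [sp]
    split
    · simp
    · cases h : sp cs (nextBo c bo) <;> simp

-- Prepend a running buffer onto the head segment.
def consHd (cur : List Char) : List (List Char) → List (List Char)
  | [] => [cur]
  | s :: r => (cur ++ s) :: r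

-- B's fold, characterised by sp.
lemma b_fold : ∀ (cs : List Char) (parts : List (List Char)) (cur : List Char) (bo : Bool),
    (cs.foldl bStep (parts, cur, bo)).1 ++ [(cs.foldl bStep (parts, cur, bo)).2.1]
      = parts ++ consHd cur (sp cs bo)
  | [], parts, cur, bo => by simp [sp, consHd]
  | c :: cs, parts, cur, bo => by
    rw [List.foldl_cons]
    by_cases h : c = '/' ∧ bo = false
    · have hstep : bStep (parts, cur, bo) c = (parts ++ [cur], [], bo) := by
        simp [bStep, h]
      rw [hstep, b_fold cs]
      obtain ⟨hc, hbo⟩ := h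
      subst hc; subst hbo
      cases hsp : sp cs false with
      | nil => exact absurd hsp (sp_ne_nil cs false)
      | cons s r => simp [sp, consHd, hsp]
    · have hstep : bStep (parts, cur, bo) c = (parts, cur ++ [c], nextBo c bo) := by
        simp only [bStep, nextBo]
        split_ifs with h1 h2 <;> simp_all
      rw [hstep, b_fold cs]
      cases hsp : sp cs (nextBo c bo) with
      | nil => exact absurd hsp (sp_ne_nil _ _)
      | cons s r =>
        simp only [sp, if_neg h, hsp, consHd]
        simp

-- A's fold, part 1: the pure index list it accumulates.
def idxsF : List (Int × Char) → Bool → List Int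
  | [], _ => []
  | ic :: l, bo =>
    if ic.2 = '/' ∧ bo = false then ic.1 :: idxsF l bo
    else idxsF l (nextBo ic.2 bo)

lemma idxsF_cons (i : Int) (c : Char) (l : List (Int × Char)) (bo : Bool) :
    idxsF ((i, c) :: l) bo
      = if c = '/' ∧ bo = false then i :: idxsF l bo else idxsF l (nextBo c bo) := rfl

lemma a_fold : ∀ (l : List (Int × Char)) (acc : List Int) (bo : Bool),
    (l.foldl aStep (acc, bo)).1 = acc ++ idxsF l bo
  | [], acc, bo => by simp [idxsF]
  | ic :: l, acc, bo => by
    rw [List.foldl_cons]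
    by_cases h : ic.2 = '/' ∧ bo = false
    · have hstep : aStep (acc, bo) ic = (acc ++ [ic.1], bo) := by simp [aStep, h]
      rw [hstep, a_fold l, idxsF, if_pos h, List.append_assoc, List.singleton_append]
    · have hstep : aStep (acc, bo) ic = (acc, nextBo ic.2 bo) := by
        simp only [aStep, nextBo]
        split_ifs with h1 h2 <;> simp_all
      rw [hstep, a_fold l, idxsF, if_neg h]

-- Every recorded index is at least the enumeration start.
lemma idxs_ge : ∀ (cs : List Char) (k : Nat) (bo : Bool) (i : Int),
    i ∈ idxsF (PySem.List.enumerate cs (k : Int)) bo → (k : Int) ≤ i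
  | [], k, bo, i => by simp [PySem.List.enumerate_nil, idxsF]
  | c :: cs, k, bo, i => by
    intro h
    have hcast : (k : Int) + 1 = ((k + 1 : Nat) : Int) := by push_cast; ring
    rw [PySem.List.enumerate_cons, idxsF_cons, hcast] at h
    split_ifs at h with hc
    · rcases List.mem_cons.mp h with h0 | h1
      · omega
      · have := idxs_ge cs (k + 1) bo i h1; push_cast at this; omega
    · have := idxs_ge cs (k + 1) (nextBo c bo) i h
      push_cast at this; omega

-- The segments A's comprehension produces from an index list.
def segs (p : List Char) : List Int → List (List Char)
  | i :: j :: rest => PySem.List.slice p (some (i + 1)) (some j) :: segs p (j :: rest)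
  | _ => []

lemma zip_segs (p : List Char) (l : List Int) :
    (List.zip (PySem.List.slice l none (some (-1))) (PySem.List.slice l (some 1) none)).map
      (fun ij => PySem.List.slice p (some (ij.1 + 1)) (some ij.2)) = segs p l := by
  rw [PySem.List.slice_to_neg_one, PySem.List.slice_from_one]
  induction l with
  | nil => simp [segs]
  | cons i l ih =>
    cases l with
    | nil => simp [segs]
    | cons j rest =>
      simp only [List.tail_cons] at ih ⊢
      simp only [List.dropLast_cons₂, List.zip_cons_cons, List.map_cons, segs]
      rw [← ih]

-- One step of slicing: p[k:j] = c :: p[k+1:j] when p.drop k = c :: cs and k+1 ≤ j.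
lemma slice_cons_step (p : List Char) (k : Nat) (c : Char) (cs : List Char)
    (hk : p.drop k = c :: cs) (j : Int) (hj : (k : Int) + 1 ≤ j) :
    PySem.List.slice p (some (k : Int)) (some j)
      = c :: PySem.List.slice p (some ((k : Int) + 1)) (some j) := by
  have hdrop : p.drop (k + 1) = cs := by
    have := congrArg List.tail hk
    simpa [List.tail_drop] using this
  rw [PySem.List.slice_toNat p (by positivity) (by omega),
      PySem.List.slice_toNat p (by omega) (by omega)]
  have h1 : ((k : Int)).toNat = k := Int.toNat_natCast k
  have h2 : ((k : Int) + 1).toNat = k + 1 := by omega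
  rw [h1, h2, hk, hdrop]
  have h4 : j.toNat - k = (j.toNat - (k + 1)) + 1 := by omega
  rw [h4, List.take_succ_cons]

-- A's index list, sliced, produces exactly sp.
lemma a_segs (p : List Char) : ∀ (cs : List Char) (k : Nat) (bo : Bool), p.drop k = cs →
    segs p (((k : Int) - 1) ::
        (idxsF (PySem.List.enumerate cs (k : Int)) bo ++ [(p.length : Int)])) = sp cs bo
  | [], k, bo => by
    intro hk
    simp only [PySem.List.enumerate_nil, idxsF, List.nil_append]
    have hc : (k : Int) - 1 + 1 = (k : Int) := by ring
    rw [segs, hc, PySem.List.slice_natCast, hk]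
    simp [segs, sp]
  | c :: cs, k, bo => by
    intro hk
    have hkl : k < p.length := by
      by_contra hge
      rw [List.drop_eq_nil_of_le (by omega)] at hk
      exact absurd hk (by simp)
    have hdrop : p.drop (k + 1) = cs := by
      have := congrArg List.tail hk
      simpa [List.tail_drop] using this
    have hcast : (k : Int) + 1 = ((k + 1 : Nat) : Int) := by push_cast; ring
    rw [PySem.List.enumerate_cons, idxsF_cons, hcast]
    by_cases h : c = '/' ∧ bo = false
    · rw [if_pos h]
      obtain ⟨hc, hbo⟩ := h
      subst hc; subst hbo
      have ihs := a_segs p cs (k + 1) false hdrop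
      rw [List.cons_append, segs, sp, if_pos ⟨rfl, rfl⟩]
      refine List.cons_eq_cons.mpr ⟨?_, ?_⟩
      · have he : (k : Int) - 1 + 1 = (k : Int) := by ring
        rw [he, PySem.List.slice_natCast]
        simp
      · have he : (k : Int) = ((k + 1 : Nat) : Int) - 1 := by push_cast; ring
        rw [he]
        exact ihs
    · rw [if_neg h]
      have ihs := a_segs p cs (k + 1) (nextBo c bo) hdrop
      rw [sp, if_neg h]
      cases hsp : sp cs (nextBo c bo) with
      | nil => exact absurd hsp (sp_ne_nil _ _)
      | cons s r =>
        rw [hsp] at ihs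
        rcases hx : idxsF (PySem.List.enumerate cs ((k + 1 : Nat) : Int)) (nextBo c bo) ++
            [(p.length : Int)] with _ | ⟨j, rest⟩
        · exact absurd hx (by simp)
        · have hj : (k : Int) + 1 ≤ j := by
            have hmem : j ∈ idxsF (PySem.List.enumerate cs ((k + 1 : Nat) : Int)) (nextBo c bo)
                ++ [(p.length : Int)] := by rw [hx]; exact List.mem_cons_self
            rcases List.mem_append.mp hmem with hm | hm
            · have := idxs_ge cs (k + 1) (nextBo c bo) j hm
              push_cast at this; omega
            · simp at hm; omega
          rw [hx] at ihs
          show segs p (((k : Int) - 1) :: j :: rest) = (c :: s) :: r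
          have he : ((k + 1 : Nat) : Int) - 1 = (k : Int) := by push_cast; ring
          rw [he] at ihs
          rw [show segs p ((k : Int) :: j :: rest)
              = PySem.List.slice p (some ((k : Int) + 1)) (some j) :: segs p (j :: rest)
            from rfl] at ihs
          rw [show segs p (((k : Int) - 1) :: j :: rest)
              = PySem.List.slice p (some ((k : Int) - 1 + 1)) (some j) :: segs p (j :: rest)
            from rfl]
          have hh := List.cons_eq_cons.mp ihs
          refine List.cons_eq_cons.mpr ⟨?_, hh.2⟩
          have he2 : (k : Int) - 1 + 1 = (k : Int) := by ring
          rw [he2, slice_cons_step p k c cs hk j hj, hh.1]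

-- A computes sp.
lemma aEq (pattern : String) :
    split_pattern_by_sep_py pattern = (sp pattern.toList false).map String.ofList := by
  show (List.zip
      (PySem.List.slice (((PySem.List.enumerate pattern.toList 0).foldl aStep ([-1], false)).1
        ++ [(pattern.toList.length : Int)]) none (some (-1)))
      (PySem.List.slice (((PySem.List.enumerate pattern.toList 0).foldl aStep ([-1], false)).1
        ++ [(pattern.toList.length : Int)]) (some 1) none)).map
      (fun ij => String.ofList (PySem.List.slice pattern.toList (some (ij.1 + 1)) (some ij.2)))
    = (sp pattern.toList false).map String.ofList
  rw [a_fold]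
  have hfun : (fun ij : Int × Int =>
        String.ofList (PySem.List.slice pattern.toList (some (ij.1 + 1)) (some ij.2)))
      = String.ofList ∘
        (fun ij : Int × Int => PySem.List.slice pattern.toList (some (ij.1 + 1)) (some ij.2)) :=
    rfl
  rw [hfun, ← List.map_map, zip_segs]
  have hs := a_segs pattern.toList pattern.toList 0 false (by simp)
  simp only [Nat.cast_zero, zero_sub] at hs
  rw [List.append_assoc, List.singleton_append]
  exact congrArg (List.map String.ofList) hs

-- B computes sp.
lemma bEq (pattern : String) :
    split_pattern_by_sep_py_alt pattern = (sp pattern.toList false).map String.ofList := by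
  show ((pattern.toList.foldl bStep ([], [], false)).1
      ++ [(pattern.toList.foldl bStep ([], [], false)).2.1]).map String.ofList
    = (sp pattern.toList false).map String.ofList
  rw [b_fold]
  cases hsp : sp pattern.toList false with
  | nil => exact absurd hsp (sp_ne_nil _ _)
  | cons s r => simp [consHd]

-- ===== VERDICT (by name: the statement is the Claim_ definition above) =====
theorem split_pattern_by_sep_py_spec : Claim_equal_split_pattern_by_sep_py := by
  intro pattern _
  unfold Spec_split_pattern_by_sep_py
  rw [aEq, bEq]
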